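-- pv_equiv track=rewrite | github.com/infercode/mcp-vibe-coding-package | src/lesson_memory/consolidation.py | _generate_merged_name
-- ===== SOURCE A (Python) =====
-- from typing import Dict, List, Optional, Union, Any
--
-- def _generate_merged_name(names: List[str]) -> str:
--     """
--     Generate a new name for a merged lesson based on common terms in source lessons.
--
--     Args:
--         names: List of source lesson names
--
--     Returns:
--         Suggested name for the merged lesson
--     """
--     if not names:
--         return "Consolidated Lesson"
--
--     if len(names) == 1:
--         return names[0]
--
--     # Tokenize names and find common words
--     tokenized_names = []
--     for name in names:
--         # Simple tokenization by splitting on spaces and removing punctuation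
--         tokens = "".join(c if c.isalnum() or c.isspace() else " " for c in name.lower()).split()
--         tokenized_names.append(set(tokens))
--
--     # Find common tokens
--     common_tokens = set.intersection(*tokenized_names)
--
--     # Remove very common words
--     stop_words = {"the", "a", "an", "and", "or", "but", "of", "in", "on", "for", "to", "with", "lesson"}
--     common_tokens = common_tokens - stop_words
--
--     if common_tokens:
--         # Reconstruct name from common tokens
--         common_name = " ".join(sorted(common_tokens)).title()
--         return f"Consolidated {common_name} Lesson"
--
--     # Fall back to a generic name
--     return f"Consolidated Lesson ({len(names)} sources)"
-- ===== SOURCE B (Python) =====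
-- from collections import Counter
--
-- _STOP_WORDS = {"the", "a", "an", "and", "or", "but", "of", "in", "on", "for", "to", "with", "lesson"}
--
--
-- def _tokens(name):
--     cleaned = "".join(c if c.isalnum() or c.isspace() else " " for c in name.lower())
--     return list(dict.fromkeys(cleaned.split()))
--
--
-- def _generate_merged_name(names):
--     if not names:
--         return "Consolidated Lesson"
--     if len(names) == 1:
--         return names[0]
--     counts = Counter(tok for name in names for tok in _tokens(name))
--     common = sorted(tok for tok, c in counts.items()
--                     if c == len(names) and tok not in _STOP_WORDS)
--     if common:
--         return f"Consolidated {' '.join(common).title()} Lesson"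
--     return f"Consolidated Lesson ({len(names)} sources)"
-- ===== Notes on version B (the rewrite author's own statement) =====
-- stated objective: alternative
-- what changed: Replaces the list-of-sets plus set.intersection(*...) with a single Counter over each name's deduplicated tokens, selecting tokens whose count equals len(names); same tokenization and output branches.
import Mathlib
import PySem

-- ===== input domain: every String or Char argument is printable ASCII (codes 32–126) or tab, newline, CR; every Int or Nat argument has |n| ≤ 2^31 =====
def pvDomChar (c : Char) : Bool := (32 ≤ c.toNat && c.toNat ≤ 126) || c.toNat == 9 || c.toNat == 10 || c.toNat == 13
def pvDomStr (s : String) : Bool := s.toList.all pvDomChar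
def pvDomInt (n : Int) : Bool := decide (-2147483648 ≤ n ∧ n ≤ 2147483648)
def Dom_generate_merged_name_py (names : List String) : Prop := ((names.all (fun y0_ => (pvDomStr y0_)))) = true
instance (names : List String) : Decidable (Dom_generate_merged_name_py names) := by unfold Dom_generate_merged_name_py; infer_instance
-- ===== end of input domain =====

-- B replaces the list of per-name token sets and set.intersection(*...) by one Counter over the
-- deduplicated tokens, keeping tokens whose count equals len(names); same branches and output.

-- ===== PORT A =====
-- shared tokenization (identical line in both Pythons):
-- "".join(c if c.isalnum() or c.isspace() else " " for c in name.lower()).split()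
def tokList (name : String) : List String :=
  PySem.Str.split₀ (String.mk ((PySem.Str.lower name).toList.map
    (fun c => if PySem.Chars.isalnum c || PySem.Chars.isspace c then c else ' ')))

-- hand port of str.title() for ASCII: a letter is uppercased when the previous char is
-- not a letter, lowercased otherwise; non-letters pass through (exact on the ASCII domain)
def pyTitle (s : String) : String :=
  String.mk ((s.toList.foldl
    (fun (acc : List Char × Bool) c =>
      if PySem.Chars.isalpha c then
        (acc.1 ++ [if acc.2 then PySem.Chars.lowerChar c else PySem.Chars.upperChar c], true)
      else (acc.1 ++ [c], false)) ([], false)).1)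

def stopWords : PySem.Set String :=
  PySem.Set.ofList ["the", "a", "an", "and", "or", "but", "of", "in", "on", "for", "to", "with", "lesson"]

-- tokenized_names is the head set t0 together with the mapped tail;
-- set.intersection(*tokenized_names) is the fold of Set.inter over the tail from t0
def generate_merged_name_py (names : List String) : String :=
  match names with
  | [] => "Consolidated Lesson"
  | [n] => n
  | n0 :: n1 :: rest =>
    let t0 := PySem.Set.ofList (tokList n0)
    let tokenizedRest := (n1 :: rest).map (fun name => PySem.Set.ofList (tokList name))
    let common := tokenizedRest.foldl PySem.Set.inter t0
    let common2 := PySem.Set.diff common stopWords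
    if common2.isEmpty then
      "Consolidated Lesson (" ++ PySem.Int.toStr (Int.ofNat (n0 :: n1 :: rest).length) ++ " sources)"
    else
      "Consolidated " ++ pyTitle (PySem.Str.join " " (PySem.List.sorted common2 (fun x => x) false)) ++ " Lesson"

-- ===== PORT B =====
def generate_merged_name_py_alt (names : List String) : String :=
  match names with
  | [] => "Consolidated Lesson"
  | [n] => n
  | n0 :: n1 :: rest =>
    let counts := PySem.Dict.counter ((n0 :: n1 :: rest).flatMap (fun name => PySem.List.dedup (tokList name)))
    let common := PySem.List.sorted
      ((counts.items.filter
        (fun p => p.2 == (Int.ofNat (n0 :: n1 :: rest).length) && !(PySem.Set.contains stopWords p.1))).map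
        (fun p => p.1)) (fun x => x) false
    if common.isEmpty then
      "Consolidated Lesson (" ++ PySem.Int.toStr (Int.ofNat (n0 :: n1 :: rest).length) ++ " sources)"
    else
      "Consolidated " ++ pyTitle (PySem.Str.join " " common) ++ " Lesson"

-- ===== PRECONDITION & SPEC =====
def Spec_generate_merged_name_py (names : List String) (out : String) : Prop := out = generate_merged_name_py_alt names
instance (names : List String) (out : String) : Decidable (Spec_generate_merged_name_py names out) := by unfold Spec_generate_merged_name_py; infer_instance

-- ===== CLAIM (what is proved, stated in full; the proofs are below) =====
def Claim_equal_generate_merged_name_py : Prop := ∀ (names : List String), Dom_generate_merged_name_py names → Spec_generate_merged_name_py names (generate_merged_name_py names)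

-- ===== LEMMAS AND PROOFS =====

theorem mem_foldl_inter (l : List (PySem.Set String)) (s : PySem.Set String) (t : String) :
    t ∈ l.foldl PySem.Set.inter s ↔ t ∈ s ∧ ∀ x ∈ l, t ∈ x := by
  induction l generalizing s with
  | nil => simp
  | cons h tl ih => simp [List.foldl_cons, ih, PySem.Set.mem_inter]; tauto

theorem nodup_foldl_inter (l : List (PySem.Set String)) (s : PySem.Set String) (hs : s.Nodup) :
    (l.foldl PySem.Set.inter s).Nodup := by
  induction l generalizing s with
  | nil => exact hs
  | cons h tl ih => exact ih _ (PySem.Set.nodup_inter _ _ hs)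

-- count of a token across the flattened deduplicated token lists = number of names containing it
theorem count_flatMap_dedup (names : List String) (t : String) :
    (names.flatMap (fun nm => PySem.List.dedup (tokList nm))).count t
      = names.countP (fun nm => decide (t ∈ tokList nm)) := by
  induction names with
  | nil => simp
  | cons n ns ih =>
    rw [List.flatMap_cons, List.count_append, ih, List.countP_cons]
    by_cases h : t ∈ tokList n
    · have hm : t ∈ PySem.List.dedup (tokList n) := by simpa [PySem.List.mem_dedup] using h
      rw [List.count_eq_one_of_mem (PySem.List.nodup_dedup _) hm]
      simp [h, Nat.add_comm]
    · have hm : t ∉ PySem.List.dedup (tokList n) := by simpa [PySem.List.mem_dedup] using h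
      rw [List.count_eq_zero_of_not_mem hm]
      simp [h]
set_option maxHeartbeats 1000000 in
theorem generate_merged_name_py_spec : Claim_equal_generate_merged_name_py := by
  intro names _
  unfold Spec_generate_merged_name_py
  match names with
  | [] => rfl
  | [n] => rfl
  | n0 :: n1 :: rest =>
    show generate_merged_name_py (n0 :: n1 :: rest) = generate_merged_name_py_alt (n0 :: n1 :: rest)
    simp only [generate_merged_name_py, generate_merged_name_py_alt]
    set nm : List String := n0 :: n1 :: rest with hnm
    set aList : List String :=
      PySem.Set.diff (((n1 :: rest).map (fun name => PySem.Set.ofList (tokList name))).foldl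
        PySem.Set.inter (PySem.Set.ofList (tokList n0))) stopWords with haL
    set allT : List String := nm.flatMap (fun name => PySem.List.dedup (tokList name)) with hallT
    set bList : List String :=
      ((PySem.Dict.counter allT).items.filter
        (fun p => p.2 == (Int.ofNat nm.length) && !(PySem.Set.contains stopWords p.1))).map
        (fun p => p.1) with hbL
    clear_value bList allT aList nm
    -- bList as a filter of the distinct tokens
    have hbL' : bList = (PySem.Set.ofList allT).filter
        (fun k => ((allT.count k : Int) == (Int.ofNat nm.length)) && !(PySem.Set.contains stopWords k)) := by
      rw [hbL, PySem.Dict.items_counter, List.filter_map, List.map_map]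
      simp only [Function.comp_def, List.map_id']
    -- same membership, both characterized by: t is a token of every name and not a stop word
    have hcontain : ∀ t, (!(PySem.Set.contains stopWords t)) = true ↔ t ∉ stopWords := by
      intro t
      constructor
      · intro h hmem'
        rw [(PySem.Set.contains_iff stopWords t).mpr hmem'] at h
        cases h
      · intro h
        cases hc : PySem.Set.contains stopWords t
        · rfl
        · exact absurd ((PySem.Set.contains_iff stopWords t).mp hc) h
    have hmemA : ∀ t, t ∈ aList ↔ ((∀ a ∈ nm, t ∈ tokList a) ∧ t ∉ stopWords) := by
      intro t
      rw [haL, PySem.Set.mem_diff, mem_foldl_inter, hnm]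
      simp only [List.forall_mem_map, PySem.Set.mem_ofList, List.forall_mem_cons]
    have hbridge : ∀ t, (t ∈ allT ∧ allT.count t = nm.length) ↔ (∀ a ∈ nm, t ∈ tokList a) := by
      intro t
      rw [hallT, count_flatMap_dedup]
      constructor
      · rintro ⟨_, hc⟩ a ha
        exact of_decide_eq_true (List.countP_eq_length.mp hc a ha)
      · intro h
        refine ⟨List.mem_flatMap.mpr ⟨n0, by simp [hnm], ?_⟩,
          List.countP_eq_length.mpr (fun a ha => decide_eq_true (h a ha))⟩
        rw [PySem.List.mem_dedup]
        exact h n0 (by simp [hnm])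
    have hmemB : ∀ t, t ∈ bList ↔ ((∀ a ∈ nm, t ∈ tokList a) ∧ t ∉ stopWords) := by
      intro t
      rw [hbL']
      simp only [List.mem_filter, PySem.Set.mem_ofList, Bool.and_eq_true, beq_iff_eq]
      rw [hcontain t]
      constructor
      · rintro ⟨hm, hc, hs⟩
        rw [Int.ofNat_eq_natCast] at hc
        exact ⟨(hbridge t).mp ⟨hm, by exact_mod_cast hc⟩, hs⟩
      · rintro ⟨h, hs⟩
        obtain ⟨hm, hc⟩ := (hbridge t).mpr h
        refine ⟨hm, ?_, hs⟩
        rw [Int.ofNat_eq_natCast]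
        exact_mod_cast hc
    have hmem : ∀ t, t ∈ aList ↔ t ∈ bList := fun t => (hmemA t).trans (hmemB t).symm
    -- both Nodup, hence a permutation, hence equal after sorting
    have hand : aList.Nodup := by
      rw [haL]
      exact PySem.Set.nodup_diff _ _ (nodup_foldl_inter _ _ (PySem.Set.nodup_ofList _))
    have hbnd : bList.Nodup := by
      rw [hbL']; exact (PySem.Set.nodup_ofList _).filter _
    have hperm : aList.Perm bList := (List.perm_ext_iff_of_nodup hand hbnd).mpr hmem
    have hsorted : PySem.List.sorted aList (fun x => x) false
        = PySem.List.sorted bList (fun x => x) false :=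
      PySem.List.sorted_eq_sorted_of_perm _ _ _ (fun a b h => h) hperm
    by_cases ha : aList = []
    · have hb : bList = [] := by
        cases hb : bList with
        | nil => rfl
        | cons x xs => exact absurd ((hmem x).mpr (by simp [hb])) (by simp [ha])
      rw [ha, hb]
      rfl
    · have hb : bList ≠ [] := by
        intro hb
        cases ha' : aList with
        | nil => exact ha ha'
        | cons x xs => exact absurd ((hmem x).mp (by simp [ha'])) (by simp [hb])
      have hbs : PySem.List.sorted bList (fun x => x) false ≠ [] := by
        intro h
        exact hb (Iff.mp (PySem.List.sorted_eq_nil_iff bList (fun x => x) false) h)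
      rw [List.isEmpty_eq_false_iff.mpr ha, List.isEmpty_eq_false_iff.mpr hbs, ← hsorted]

-- ===== VERDICT (by name: the statement is the Claim_ definition above) =====
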